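-- pv_equiv track=rewrite | github.com/sl-harris/aoc-2024 | day1/main.py | calc_similarity
-- ===== SOURCE A (Python) =====
-- def calc_similarity(left, right):
--     scores = {}
--     score = 0
--
--     for l in left:
--         if l in scores.keys():
--             score += int(l) * scores[l]
--             continue
--
--         scores[l] = sum([1 if l == r else 0 for r in right])
--         score += int(l) * scores[l]
--
--     return score
-- ===== SOURCE B (Python) =====
-- def calc_similarity(left, right):
--     counts = {}
--     for r in right:
--         counts[r] = counts.get(r, 0) + 1
--     return sum(l * counts.get(l, 0) for l in left)
-- ===== Notes on version B (the rewrite author's own statement) =====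
-- stated objective: faster
-- what changed: B builds a count dictionary over right in one pass and sums l*count per left element, replacing A's per-distinct-left full scan of right with lazy memoization.
import Mathlib
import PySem

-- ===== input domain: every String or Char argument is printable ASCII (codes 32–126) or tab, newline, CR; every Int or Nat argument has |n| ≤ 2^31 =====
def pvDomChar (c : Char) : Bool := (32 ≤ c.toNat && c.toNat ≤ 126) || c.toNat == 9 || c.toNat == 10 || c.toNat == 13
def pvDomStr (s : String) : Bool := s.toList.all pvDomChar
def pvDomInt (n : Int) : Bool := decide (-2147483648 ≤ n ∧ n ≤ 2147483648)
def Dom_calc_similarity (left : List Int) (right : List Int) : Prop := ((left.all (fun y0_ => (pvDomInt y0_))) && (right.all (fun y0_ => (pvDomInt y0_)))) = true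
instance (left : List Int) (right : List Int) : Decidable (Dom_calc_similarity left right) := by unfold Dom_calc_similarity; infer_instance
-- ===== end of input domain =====

-- B replaces A's lazily-memoized full rescans of `right` with a single counting
-- pass over `right` followed by one lookup per left element (objective: faster).

-- ===== PORT A =====
def calc_similarity (left : List Int) (right : List Int) : Int :=
  (left.foldl (fun (st : PySem.Dict Int Int × Int) l =>
      let scores := st.1
      let score := st.2
      if scores.contains l then
        (scores, score + l * scores.getD l 0)
      else
        let c := (right.map (fun r => if l == r then (1 : Int) else 0)).sum
        (scores.insert l c, score + l * c))
    (PySem.Dict.empty, 0)).2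

-- ===== PORT B =====
def calc_similarity_alt (left : List Int) (right : List Int) : Int :=
  let counts := right.foldl (fun (d : PySem.Dict Int Int) r => d.insert r (d.getD r 0 + 1)) PySem.Dict.empty
  (left.map (fun l => l * counts.getD l 0)).sum

-- ===== PRECONDITION & SPEC =====
def Spec_calc_similarity (left : List Int) (right : List Int) (out : Int) : Prop := out = calc_similarity_alt left right
instance (left : List Int) (right : List Int) (out : Int) : Decidable (Spec_calc_similarity left right out) := by unfold Spec_calc_similarity; infer_instance

-- ===== CLAIM (what is proved, stated in full; the proofs are below) =====
def Claim_equal_calc_similarity : Prop := ∀ (left : List Int) (right : List Int), Dom_calc_similarity left right → Spec_calc_similarity left right (calc_similarity left right)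

-- ===== LEMMAS AND PROOFS =====

-- the indicator-sum computed by A equals the occurrence count
theorem pv_indicator_sum (l : Int) (right : List Int) :
    (right.map (fun r => if l == r then (1 : Int) else 0)).sum = (right.count l : Int) := by
  induction right with
  | nil => simp
  | cons r rs ih =>
    simp only [List.map_cons, List.sum_cons, List.count_cons, ih]
    by_cases h : l = r
    · simp only [h, BEq.rfl, if_true]
      omega
    · have h1 : (l == r) = false := beq_eq_false_iff_ne.mpr h
      have h2 : (r == l) = false := beq_eq_false_iff_ne.mpr (fun e => h e.symm)
      simp [h1, h2]

-- A's fold invariant: if every stored key holds the true count of `right`,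
-- the fold just adds l * right.count l for each l.
theorem pv_foldA (left : List Int) (right : List Int)
    (d : PySem.Dict Int Int) (s : Int)
    (hd : ∀ k, d.contains k → d.getD k 0 = (right.count k : Int)) :
    (left.foldl (fun (st : PySem.Dict Int Int × Int) l =>
        let scores := st.1
        let score := st.2
        if scores.contains l then
          (scores, score + l * scores.getD l 0)
        else
          let c := (right.map (fun r => if l == r then (1 : Int) else 0)).sum
          (scores.insert l c, score + l * c))
      (d, s)).2 = s + (left.map (fun l => l * (right.count l : Int))).sum := by
  induction left generalizing d s with
  | nil => simp
  | cons l ls ih =>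
    simp only [List.foldl_cons, List.map_cons, List.sum_cons]
    by_cases h : d.contains l = true
    · rw [if_pos h, ih d _ hd, hd l h]
      ring
    · rw [if_neg h, pv_indicator_sum, ih]
      · ring
      · intro k hk
        rw [PySem.Dict.getD_insert]
        by_cases hkl : k = l
        · simp [hkl]
        · rw [if_neg hkl]
          apply hd
          rw [PySem.Dict.contains_insert] at hk
          have hkl' : (k == l) = false := beq_eq_false_iff_ne.mpr hkl
          simpa [hkl'] using hk

-- B's counter gives the occurrence count
theorem pv_counts (right : List Int) (l : Int) :
    (right.foldl (fun (d : PySem.Dict Int Int) r => d.insert r (d.getD r 0 + 1)) PySem.Dict.empty).getD l 0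
      = (right.count l : Int) := by
  rw [PySem.Dict.foldl_insert_getD_add_one_eq_counter, PySem.Dict.getD_counter]

-- ===== VERDICT (by name: the statement is the Claim_ definition above) =====
theorem calc_similarity_spec : Claim_equal_calc_similarity := by
  intro left right _
  unfold Spec_calc_similarity calc_similarity calc_similarity_alt
  rw [pv_foldA left right PySem.Dict.empty 0 (by intro k hk; simp [PySem.Dict.contains_empty] at hk)]
  simp [pv_counts]
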